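-- pv_equiv track=rewrite | github.com/zpyao1996/leetcode | groupshiftedstrings.py | validshift
-- ===== SOURCE A (Python) =====
-- def validshift(a,b):
--     if not len(a)==len(b):
--         return False
--     else:
--         diff=(ord(b[0])-ord(a[0])+26)%26
--         for i in range(len(a)):
--             if not (ord(b[i])-ord(a[i])+26) % 26==diff:
--                 return False
--         return True
-- ===== SOURCE B (Python) =====
-- def _sig(s):
--     base = ord(s[0])
--     return [(ord(c) - base) % 26 for c in s]
--
-- def validshift(a, b):
--     if len(a) != len(b):
--         return False
--     return _sig(a) == _sig(b)
-- ===== Notes on version B (the rewrite author's own statement) =====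
-- stated objective: simpler
-- what changed: Instead of computing a pairwise shift and scanning positions against diff[0], B normalizes each string against its own first character into a signature list and compares the two signatures.
import Mathlib
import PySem

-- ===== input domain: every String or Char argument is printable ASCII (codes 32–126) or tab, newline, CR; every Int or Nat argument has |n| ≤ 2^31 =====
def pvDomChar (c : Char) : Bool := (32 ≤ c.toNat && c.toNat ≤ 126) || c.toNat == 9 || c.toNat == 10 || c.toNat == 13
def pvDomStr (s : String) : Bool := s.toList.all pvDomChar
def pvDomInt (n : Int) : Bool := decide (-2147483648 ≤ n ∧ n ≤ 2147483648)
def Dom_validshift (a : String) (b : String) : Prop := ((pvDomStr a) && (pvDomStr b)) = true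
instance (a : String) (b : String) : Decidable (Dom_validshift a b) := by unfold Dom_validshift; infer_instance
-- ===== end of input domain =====

-- B replaces A's "constant pairwise shift vs diff[0]" scan by comparing per-string
-- first-character-normalized signature lists; same O(n) cost, simpler decomposition.


-- ===== PORT A =====
-- the for-loop over range(len(a)) with equal lengths, walking both lists in step
def shiftLoopA (la lb : List Char) (diff : Int) : Bool :=
  match la, lb with
  | c :: cs, d :: ds =>
      if ¬ (PySem.Int.mod ((d.toNat : Int) - (c.toNat : Int) + 26) 26 = diff) then false
      else shiftLoopA cs ds diff
  | _, _ => true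

def validshift (a : String) (b : String) : Bool :=
  let la := a.toList
  let lb := b.toList
  if ¬ (la.length = lb.length) then false
  else
    match PySem.List.pyGet? la 0, PySem.List.pyGet? lb 0 with
    | some a0, some b0 =>
        let diff := PySem.Int.mod ((b0.toNat : Int) - (a0.toNat : Int) + 26) 26
        shiftLoopA la lb diff
    | _, _ => false  -- a[0]/b[0] raise IndexError in Python; excluded by Pre_

-- ===== PORT B =====
-- _sig(s): base = ord(s[0]); [(ord(c) - base) % 26 for c in s]; none = IndexError on s[0]
def shiftSigB (s : List Char) (base : Int) : List Int :=
  s.map (fun c => PySem.Int.mod ((c.toNat : Int) - base) 26)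

def shiftSigB? (s : List Char) : Option (List Int) :=
  (PySem.List.pyGet? s 0).map (fun h => shiftSigB s (h.toNat : Int))

def validshift_alt (a : String) (b : String) : Bool :=
  let la := a.toList
  let lb := b.toList
  if ¬ (la.length = lb.length) then false
  else
    match shiftSigB? la with
    | none => false  -- _sig(a) raises IndexError on the empty string; excluded by Pre_
    | some sa =>
      match shiftSigB? lb with
      | none => false  -- _sig(b) raises IndexError; excluded by Pre_
      | some sb => sa == sb

-- ===== PRECONDITION & SPEC =====
-- Both A and B raise IndexError exactly when both strings are empty (a[0]); Pre_ excludes that one input.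
def Pre_validshift (a : String) (b : String) : Prop := ¬ (a = "" ∧ b = "")
instance (a : String) (b : String) : Decidable (Pre_validshift a b) := by unfold Pre_validshift; infer_instance
def pvWitness_validshift : String × String := ("abc", "bcd")

def Spec_validshift (a : String) (b : String) (out : Bool) : Prop := out = validshift_alt a b
instance (a : String) (b : String) (out : Bool) : Decidable (Spec_validshift a b out) := by unfold Spec_validshift; infer_instance

-- ===== CLAIM (what is proved, stated in full; the proofs are below) =====
def Claim_equal_validshift : Prop := ∀ (a : String) (b : String), Dom_validshift a b → Pre_validshift a b → Spec_validshift a b (validshift a b)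

-- ===== LEMMAS AND PROOFS =====

lemma mod26 (x : Int) : PySem.Int.mod x 26 = x % 26 :=
  PySem.Int.mod_eq_emod_of_pos (by norm_num)

lemma drop26 (x : Int) : (x + 26) % 26 = x % 26 := by omega

-- pointwise: constant-shift test at one position ↔ equal signature entries
lemma shift_point_iff (c d a0 b0 : Int) :
    ((d - c) % 26 = (b0 - a0) % 26) ↔ ((c - a0) % 26 = (d - b0) % 26) := by omega

lemma loop_eq_sig (la lb : List Char) (a0 b0 : Char) (h : la.length = lb.length) :
    shiftLoopA la lb (PySem.Int.mod ((b0.toNat : Int) - (a0.toNat : Int) + 26) 26)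
      = (shiftSigB la (a0.toNat : Int) == shiftSigB lb (b0.toNat : Int)) := by
  induction la generalizing lb with
  | nil =>
      cases lb with
      | nil => simp [shiftLoopA, shiftSigB]
      | cons d ds => simp at h
  | cons c cs ih =>
      cases lb with
      | nil => simp at h
      | cons d ds =>
          simp only [List.length_cons, Nat.add_right_cancel_iff] at h
          by_cases hp : ((d.toNat : Int) - (c.toNat : Int)) % 26
              = ((b0.toNat : Int) - (a0.toNat : Int)) % 26
          · have hq := (shift_point_iff (c.toNat : Int) (d.toNat : Int)
                (a0.toNat : Int) (b0.toNat : Int)).mp hp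
            simp only [shiftLoopA, shiftSigB, List.map_cons, mod26, drop26] at ih ⊢
            simp [hp, hq, ih ds h]
          · have hq : ¬ (((c.toNat : Int) - (a0.toNat : Int)) % 26
                = ((d.toNat : Int) - (b0.toNat : Int)) % 26) := fun hx =>
              hp ((shift_point_iff _ _ _ _).mpr hx)
            simp only [shiftLoopA, shiftSigB, List.map_cons, mod26]
            simp [hp, hq]

-- ===== VERDICT (by name: the statement is the Claim_ definition above) =====
theorem validshift_spec : Claim_equal_validshift := by
  intro a b _ hpre
  unfold Spec_validshift validshift validshift_alt
  by_cases hlen : a.toList.length = b.toList.length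
  · simp only [hlen, not_true_eq_false, if_false]
    cases ha : a.toList with
    | nil =>
      exfalso
      have hb : b.toList = [] := by
        have h0 := hlen; rw [ha] at h0
        exact List.length_eq_zero_iff.mp h0.symm
      exact hpre ⟨String.toList_eq_nil_iff.mp ha, String.toList_eq_nil_iff.mp hb⟩
    | cons a0 as =>
      cases hb : b.toList with
      | nil => rw [ha, hb] at hlen; simp at hlen
      | cons b0 bs =>
        rw [ha, hb] at hlen
        simp only [shiftSigB?, PySem.List.pyGet?, PySem.List.pyIdx?]
        norm_num
        simpa only [mod26, drop26] using loop_eq_sig (a0 :: as) (b0 :: bs) a0 b0 hlen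
  · have hlen' : ¬ (a.length = b.length) := by
      simpa using hlen
    simp [hlen']
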